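-- pv_equiv track=rewrite | github.com/ISANGDEV/Algorithm_Study | 1_Greedy/maybe/bigNumber.py | big_num
-- ===== SOURCE A (Python) =====
-- def big_num(lst, m, k):
--     total, cnt = 0, 0
--     lst = sorted(lst)
--     for i in range(m):
--         if cnt < k:
--             total += lst[-1]
--             cnt += 1
--         else:
--             total += lst[-2]
--             cnt = 0
--     return total
-- ===== SOURCE B (Python) =====
-- def big_num(lst, m, k):
--     if m <= 0:
--         return 0
--     s = sorted(lst)
--     a = s[-1]
--     if k <= 0:
--         return m * s[-2]
--     if m <= k:
--         return m * a
--     b = s[-2]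
--     q, r = divmod(m, k + 1)
--     return q * (k * a + b) + r * a
-- ===== Notes on version B (the rewrite author's own statement) =====
-- stated objective: alternative
-- what changed: Replaces the O(m) greedy accumulation loop with closed-form cycle arithmetic: the pattern repeats with period k+1 (k largest then one second-largest), so the total is divmod(m, k+1) applied to one cycle's sum; total cost is still dominated by the shared sort.
import Mathlib
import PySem

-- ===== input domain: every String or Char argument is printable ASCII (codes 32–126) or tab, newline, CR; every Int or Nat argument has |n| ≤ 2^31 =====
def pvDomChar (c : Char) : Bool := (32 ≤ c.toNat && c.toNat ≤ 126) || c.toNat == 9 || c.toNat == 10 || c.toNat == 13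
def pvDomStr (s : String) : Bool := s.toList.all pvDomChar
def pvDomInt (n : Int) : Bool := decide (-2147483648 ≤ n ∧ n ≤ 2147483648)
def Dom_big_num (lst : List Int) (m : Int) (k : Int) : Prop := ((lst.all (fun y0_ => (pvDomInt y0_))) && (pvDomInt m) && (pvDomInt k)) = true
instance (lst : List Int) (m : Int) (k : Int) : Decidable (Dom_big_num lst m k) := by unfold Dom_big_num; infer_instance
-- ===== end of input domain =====

-- B replaces A's greedy accumulation loop by closed-form cycle arithmetic (period k+1); the sort still dominates the cost.


-- ===== PORT A =====
-- lst[-1] / lst[-2] ported as pyGetD with default 0; Pre_big_num excludes exactly the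
-- inputs on which Python raises IndexError there.
def big_num (lst : List Int) (m : Int) (k : Int) : Int :=
  let s := PySem.List.sorted lst (fun x => x) false
  ((PySem.List.pyRange 0 m 1).foldl
    (fun (tc : Int × Int) _ =>
      if tc.2 < k then (tc.1 + PySem.List.pyGetD s (-1) 0, tc.2 + 1)
      else (tc.1 + PySem.List.pyGetD s (-2) 0, 0)) (0, 0)).1

-- ===== PORT B =====
def big_num_alt (lst : List Int) (m : Int) (k : Int) : Int :=
  if m ≤ 0 then 0
  else
    let s := PySem.List.sorted lst (fun x => x) false
    let a := PySem.List.pyGetD s (-1) 0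
    if k ≤ 0 then m * PySem.List.pyGetD s (-2) 0
    else if m ≤ k then m * a
    else
      let b := PySem.List.pyGetD s (-2) 0
      let q := PySem.Int.floordiv m (k + 1)
      let r := PySem.Int.mod m (k + 1)
      q * (k * a + b) + r * a

-- ===== PRECONDITION & SPEC =====
-- Pre_ excludes exactly the inputs on which Python A raises IndexError:
-- the loop runs (m > 0) and reads lst[-1] from an empty list, or reads lst[-2]
-- (reached when k ≤ 0 or m > k) from a list of length < 2.
def Pre_big_num (lst : List Int) (m : Int) (k : Int) : Prop :=
  m ≤ 0 ∨ 2 ≤ lst.length ∨ (1 ≤ lst.length ∧ 0 < k ∧ m ≤ k)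
instance (lst : List Int) (m : Int) (k : Int) : Decidable (Pre_big_num lst m k) := by unfold Pre_big_num; infer_instance
def pvWitness_big_num : List Int × Int × Int := ([3, 1, 2], 5, 2)
def Spec_big_num (lst : List Int) (m : Int) (k : Int) (out : Int) : Prop := out = big_num_alt lst m k
instance (lst : List Int) (m : Int) (k : Int) (out : Int) : Decidable (Spec_big_num lst m k out) := by unfold Spec_big_num; infer_instance

-- ===== CLAIM (what is proved, stated in full; the proofs are below) =====
def Claim_equal_big_num : Prop := ∀ (lst : List Int) (m : Int) (k : Int), Dom_big_num lst m k → Pre_big_num lst m k → Spec_big_num lst m k (big_num lst m k)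

-- ===== LEMMAS AND PROOFS =====

-- the loop body of A, with the two (constant) list reads abstracted as a and b
def bnStep (a b k : Int) (tc : Int × Int) : Int × Int :=
  if tc.2 < k then (tc.1 + a, tc.2 + 1) else (tc.1 + b, 0)

theorem foldl_ignore {α σ : Type} (f : σ → σ) :
    ∀ (l : List α) (init : σ), l.foldl (fun s _ => f s) init = f^[l.length] init := by
  intro l
  induction l with
  | nil => intro init; rfl
  | cons x xs ih =>
      intro init
      simp [List.foldl_cons, ih, Function.iterate_succ_apply]

theorem bnStep_run_lt (a b k : Int) (hk : 0 < k) :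
    ∀ (j : Nat), j ≤ k.toNat → ∀ (t : Int),
      (bnStep a b k)^[j] (t, 0) = (t + (j : Int) * a, (j : Int)) := by
  intro j
  induction j with
  | zero => intro _ t; simp
  | succ j ih =>
      intro hj t
      rw [Function.iterate_succ_apply', ih (by omega) t]
      have hlt : (j : Int) < k := by omega
      simp only [bnStep, hlt, if_pos, Prod.mk.injEq]
      push_cast
      exact ⟨by ring, by ring⟩

theorem bnStep_run_cycle (a b k : Int) (hk : 0 < k) (t : Int) :
    (bnStep a b k)^[k.toNat + 1] (t, 0) = (t + k * a + b, 0) := by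
  rw [Function.iterate_succ_apply', bnStep_run_lt a b k hk k.toNat le_rfl t]
  have hkk : (k.toNat : Int) = k := by omega
  simp only [bnStep, hkk, lt_self_iff_false, if_false]

theorem bnStep_run_cycles (a b k : Int) (hk : 0 < k) :
    ∀ (d : Nat) (t : Int),
      (bnStep a b k)^[d * (k.toNat + 1)] (t, 0) = (t + (d : Int) * (k * a + b), 0) := by
  intro d
  induction d with
  | zero => intro t; simp
  | succ d ih =>
      intro t
      have h : (d + 1) * (k.toNat + 1) = (k.toNat + 1) + d * (k.toNat + 1) := by ring
      rw [h, Function.iterate_add_apply, ih t, bnStep_run_cycle a b k hk]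
      simp only [Prod.mk.injEq]
      push_cast
      exact ⟨by ring, trivial⟩

theorem bnStep_run (a b k : Int) (hk : 0 < k) (n : Nat) :
    (bnStep a b k)^[n] (0, 0) =
      (((n / (k.toNat + 1) : Nat) : Int) * (k * a + b) + ((n % (k.toNat + 1) : Nat) : Int) * a,
       ((n % (k.toNat + 1) : Nat) : Int)) := by
  have hrlt : n % (k.toNat + 1) < k.toNat + 1 := Nat.mod_lt n (Nat.succ_pos _)
  have hsplit : n = n % (k.toNat + 1) + (n / (k.toNat + 1)) * (k.toNat + 1) := by
    have h1 := Nat.div_add_mod n (k.toNat + 1)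
    have h2 : (n / (k.toNat + 1)) * (k.toNat + 1) = (k.toNat + 1) * (n / (k.toNat + 1)) :=
      Nat.mul_comm _ _
    omega
  calc (bnStep a b k)^[n] (0, 0)
      = (bnStep a b k)^[n % (k.toNat + 1) + (n / (k.toNat + 1)) * (k.toNat + 1)] (0, 0) := by
        rw [← hsplit]
    _ = (bnStep a b k)^[n % (k.toNat + 1)] ((bnStep a b k)^[(n / (k.toNat + 1)) * (k.toNat + 1)] (0, 0)) := by
        rw [Function.iterate_add_apply]
    _ = _ := by
        rw [bnStep_run_cycles a b k hk, bnStep_run_lt a b k hk _ (Nat.lt_succ_iff.mp hrlt)]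
        simp [zero_add]

theorem bnStep_run_nonpos (a b k : Int) (hk : k ≤ 0) :
    ∀ (n : Nat) (t : Int), (bnStep a b k)^[n] (t, 0) = (t + (n : Int) * b, 0) := by
  intro n
  induction n with
  | zero => intro t; simp
  | succ n ih =>
      intro t
      rw [Function.iterate_succ_apply', ih t]
      have hnlt : ¬ ((0 : Int) < k) := by omega
      simp only [bnStep, hnlt, if_false, Prod.mk.injEq]
      push_cast
      exact ⟨by ring, trivial⟩

theorem big_num_eq_iter (lst : List Int) (m k : Int) :
    big_num lst m k =
      ((bnStep (PySem.List.pyGetD (PySem.List.sorted lst (fun x => x) false) (-1) 0)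
               (PySem.List.pyGetD (PySem.List.sorted lst (fun x => x) false) (-2) 0)
               k)^[m.toNat] (0, 0)).1 := by
  have h := foldl_ignore
      (bnStep (PySem.List.pyGetD (PySem.List.sorted lst (fun x => x) false) (-1) 0)
              (PySem.List.pyGetD (PySem.List.sorted lst (fun x => x) false) (-2) 0) k)
      (PySem.List.pyRange 0 m 1) ((0, 0) : Int × Int)
  have hlen : (PySem.List.pyRange 0 m 1).length = m.toNat := by
    rw [PySem.List.length_pyRange_one]; norm_num
  rw [hlen] at h
  exact congrArg Prod.fst h

-- the closed form of port B with its let-bindings expanded (definitional)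
theorem big_num_alt_unfold (lst : List Int) (m k : Int) :
    big_num_alt lst m k =
      (if m ≤ 0 then 0
       else if k ≤ 0 then m * PySem.List.pyGetD (PySem.List.sorted lst (fun x => x) false) (-2) 0
       else if m ≤ k then m * PySem.List.pyGetD (PySem.List.sorted lst (fun x => x) false) (-1) 0
       else PySem.Int.floordiv m (k + 1) *
              (k * PySem.List.pyGetD (PySem.List.sorted lst (fun x => x) false) (-1) 0 +
                PySem.List.pyGetD (PySem.List.sorted lst (fun x => x) false) (-2) 0) +
            PySem.Int.mod m (k + 1) *
              PySem.List.pyGetD (PySem.List.sorted lst (fun x => x) false) (-1) 0) := rfl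

-- ===== VERDICT (by name: the statement is the Claim_ definition above) =====
theorem big_num_spec : Claim_equal_big_num := by
  intro lst m k _ _
  unfold Spec_big_num
  rw [big_num_eq_iter, big_num_alt_unfold]
  by_cases hm : m ≤ 0
  · have h0 : m.toNat = 0 := by omega
    simp [hm, h0]
  · simp only [hm, if_false]
    by_cases hk : k ≤ 0
    · rw [bnStep_run_nonpos _ _ k hk]
      have hmt : (m.toNat : Int) = m := by omega
      simp [hk, hmt]
    · have hkpos : 0 < k := by omega
      rw [bnStep_run _ _ k hkpos]
      simp only [hk, if_false]
      by_cases hmk : m ≤ k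
      · have hdiv : m.toNat / (k.toNat + 1) = 0 := Nat.div_eq_of_lt (by omega)
        have hmod : m.toNat % (k.toNat + 1) = m.toNat := Nat.mod_eq_of_lt (by omega)
        have hmt : (m.toNat : Int) = m := by omega
        simp [hmk, hdiv, hmod, hmt]
      · simp only [hmk, if_false]
        have h1 : PySem.Int.floordiv m (k + 1) = ((m.toNat / (k.toNat + 1) : Nat) : Int) := by
          rw [show m = ((m.toNat : Nat) : Int) by omega, show k + 1 = ((k.toNat + 1 : Nat) : Int) by omega,
              PySem.Int.floordiv_natCast]
          norm_num
        have h2 : PySem.Int.mod m (k + 1) = ((m.toNat % (k.toNat + 1) : Nat) : Int) := by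
          rw [show m = ((m.toNat : Nat) : Int) by omega, show k + 1 = ((k.toNat + 1 : Nat) : Int) by omega,
              PySem.Int.mod_natCast]
          norm_num
        rw [h1, h2]
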